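-- pv_equiv track=rewrite | github.com/ffastIA/PlanejamentoCustos | otimizador/utils.py | calcular_meses_ativos
-- ===== SOURCE A (Python) =====
-- from typing import List, Tuple, Dict
--
-- def calcular_meses_ativos(mes_inicio: int, duracao: int, meses_ferias: List[int], num_meses: int) -> List[int]:
--     """Calcula meses em que a turma está ativa (excluindo férias)."""
--     meses_ativos = []
--     mes_atual = mes_inicio
--     meses_trabalhados = 0
--     while meses_trabalhados < duracao and mes_atual < num_meses:
--         if mes_atual not in meses_ferias:
--             meses_ativos.append(mes_atual)
--             meses_trabalhados += 1
--         mes_atual += 1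
--     return meses_ativos
-- ===== SOURCE B (Python) =====
-- def calcular_meses_ativos(mes_inicio: int, duracao: int, meses_ferias, num_meses: int):
--     """Eager set-difference over a bounded window: at most `duracao` months are
--     kept and at most len(meses_ferias) distinct months can be skipped, so months
--     past mes_inicio + duracao + len(meses_ferias) are never needed.  The
--     candidate months are the set of window months minus the vacation set, sorted
--     ascending (A's emission order); the first `duracao` of them are the answer."""
--     fim = min(num_meses, mes_inicio + max(duracao, 0) + len(meses_ferias))
--     candidatos = sorted(set(range(mes_inicio, fim)) - set(meses_ferias))
--     return candidatos[:duracao] if duracao > 0 else []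
-- ===== Notes on version B (the rewrite author's own statement) =====
-- stated objective: alternative
-- what changed: Replaces A's interleaved while loop (per-month vacation list scan plus a worked-months counter with early stop) by a staged computation: a bounded candidate window (at most duracao kept months plus len(meses_ferias) possible skips), an eager set difference set(window) - set(meses_ferias) with hash membership, a sort, and a slice of the first duracao months.
import Mathlib
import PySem

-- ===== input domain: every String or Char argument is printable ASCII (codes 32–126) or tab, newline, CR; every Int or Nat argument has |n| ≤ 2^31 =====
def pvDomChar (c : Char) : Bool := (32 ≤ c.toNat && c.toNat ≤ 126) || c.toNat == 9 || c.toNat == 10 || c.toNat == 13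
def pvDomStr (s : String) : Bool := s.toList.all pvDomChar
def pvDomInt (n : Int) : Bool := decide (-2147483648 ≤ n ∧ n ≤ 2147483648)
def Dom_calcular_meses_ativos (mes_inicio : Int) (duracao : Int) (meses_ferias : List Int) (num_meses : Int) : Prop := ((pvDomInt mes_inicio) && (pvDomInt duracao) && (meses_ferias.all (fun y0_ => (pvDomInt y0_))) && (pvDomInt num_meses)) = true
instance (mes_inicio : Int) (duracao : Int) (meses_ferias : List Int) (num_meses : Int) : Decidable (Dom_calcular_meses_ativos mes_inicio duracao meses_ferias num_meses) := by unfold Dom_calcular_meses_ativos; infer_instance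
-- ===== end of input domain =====

-- B replaces A's interleaved while loop by a staged set-difference / sort / slice computation (alternative, same result).

-- ===== PORT A =====
-- the while loop of A: state (mes_atual, meses_trabalhados, meses_ativos)
def calcA_loop (meses_ferias : List Int) (duracao num_meses : Int)
    (mes_atual meses_trabalhados : Int) (meses_ativos : List Int) : List Int :=
  if _h : meses_trabalhados < duracao ∧ mes_atual < num_meses then
    if meses_ferias.contains mes_atual then
      calcA_loop meses_ferias duracao num_meses (mes_atual + 1) meses_trabalhados meses_ativos
    else
      calcA_loop meses_ferias duracao num_meses (mes_atual + 1) (meses_trabalhados + 1)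
        (meses_ativos ++ [mes_atual])
  else meses_ativos
termination_by (num_meses - mes_atual).toNat
decreasing_by all_goals (omega)

def calcular_meses_ativos (mes_inicio : Int) (duracao : Int) (meses_ferias : List Int) (num_meses : Int) : List Int :=
  calcA_loop meses_ferias duracao num_meses mes_inicio 0 []

-- ===== PORT B =====
-- fim = min(num_meses, mes_inicio + max(duracao, 0) + len(meses_ferias));
-- candidatos = sorted(set(range(mes_inicio, fim)) - set(meses_ferias));
-- return candidatos[:duracao] if duracao > 0 else []
def calcular_meses_ativos_alt (mes_inicio : Int) (duracao : Int) (meses_ferias : List Int) (num_meses : Int) : List Int :=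
  let fim : Int := min num_meses (mes_inicio + max duracao 0 + (meses_ferias.length : Int))
  let candidatos : List Int :=
    PySem.List.sorted
      (PySem.Set.diff (PySem.Set.ofList (PySem.List.pyRange mes_inicio fim 1))
        (PySem.Set.ofList meses_ferias)) (fun x => x) false
  if duracao > 0 then PySem.List.slice candidatos none (some duracao) else []

-- ===== PRECONDITION & SPEC =====
def Spec_calcular_meses_ativos (mes_inicio : Int) (duracao : Int) (meses_ferias : List Int) (num_meses : Int) (out : List Int) : Prop := out = calcular_meses_ativos_alt mes_inicio duracao meses_ferias num_meses
instance (mes_inicio : Int) (duracao : Int) (meses_ferias : List Int) (num_meses : Int) (out : List Int) : Decidable (Spec_calcular_meses_ativos mes_inicio duracao meses_ferias num_meses out) := by unfold Spec_calcular_meses_ativos; infer_instance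

-- ===== CLAIM (what is proved, stated in full; the proofs are below) =====
def Claim_equal_calcular_meses_ativos : Prop := ∀ (mes_inicio : Int) (duracao : Int) (meses_ferias : List Int) (num_meses : Int), Dom_calcular_meses_ativos mes_inicio duracao meses_ferias num_meses → Spec_calcular_meses_ativos mes_inicio duracao meses_ferias num_meses (calcular_meses_ativos mes_inicio duracao meses_ferias num_meses)

-- ===== LEMMAS AND PROOFS =====

-- Loop invariant: A's loop from state (a, t, acc) appends exactly the first
-- (duracao - t) non-vacation months of range(a, num_meses).
theorem calcA_loop_eq (meses_ferias : List Int) (duracao num_meses : Int) :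
    ∀ (n : ℕ) (a t : Int) (acc : List Int), (num_meses - a).toNat = n →
      calcA_loop meses_ferias duracao num_meses a t acc =
        acc ++ (((PySem.List.pyRange a num_meses 1).filter
          (fun m => !(meses_ferias.contains m))).take (duracao - t).toNat) := by
  intro n
  induction n with
  | zero =>
      intro a t acc hn
      have hba : num_meses ≤ a := by omega
      rw [calcA_loop, PySem.List.pyRange_one_eq_nil hba]
      simp
      omega
  | succ n ih =>
      intro a t acc hn
      have hab : a < num_meses := by omega
      rw [calcA_loop, PySem.List.pyRange_one_cons hab]
      by_cases ht : t < duracao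
      · simp only [ht, hab, and_self, dite_true]
        by_cases hf : meses_ferias.contains a
        · rw [if_pos hf, ih (a + 1) t acc (by omega)]
          have hf' : decide (a ∈ meses_ferias) = true := by simpa using hf
          simp [hf']
        · rw [if_neg hf, ih (a + 1) (t + 1) (acc ++ [a]) (by omega)]
          have hf' : decide (a ∈ meses_ferias) = false := by simpa using hf
          have htake : (duracao - t).toNat = (duracao - (t + 1)).toNat + 1 := by omega
          simp [hf', htake, List.take_succ_cons]
      · have : ¬ (t < duracao ∧ a < num_meses) := by tauto
        rw [dif_neg this]
        have h0 : (duracao - t).toNat = 0 := by omega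
        simp [h0]

-- B's candidate list IS the filtered range: the range is strictly increasing and
-- duplicate-free, so set(range)-set(ferias) is a filter and sorting it is the identity.
theorem calcB_candidatos_eq (mes_inicio num_meses : Int) (meses_ferias : List Int) :
    PySem.List.sorted
      (PySem.Set.diff (PySem.Set.ofList (PySem.List.pyRange mes_inicio num_meses 1))
        (PySem.Set.ofList meses_ferias)) (fun x => x) false =
      (PySem.List.pyRange mes_inicio num_meses 1).filter
        (fun m => !(meses_ferias.contains m)) := by
  rw [PySem.Set.ofList_eq_self_of_nodup _ (PySem.List.nodup_pyRange_one mes_inicio num_meses)]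
  have hdiff : PySem.Set.diff (PySem.List.pyRange mes_inicio num_meses 1)
      (PySem.Set.ofList meses_ferias)
      = (PySem.List.pyRange mes_inicio num_meses 1).filter
          (fun m => !(meses_ferias.contains m)) := by
    simp only [PySem.Set.diff]
    apply List.filter_congr
    intro x _
    simp [PySem.Set.mem_ofList]
  rw [hdiff]
  exact PySem.List.sorted_eq_of_perm_of_pairwise_lt _ _ _ (List.Perm.refl _)
    ((PySem.List.pairwise_lt_pyRange_one mes_inicio num_meses).filter _)

-- Window truncation: among the first d + |ferias| months of the range at most
-- |ferias| distinct months can fail the filter, so the first d surviving months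
-- all lie before min b (a + d + |ferias|); truncating the range there preserves take d.
theorem take_filter_window (a b : Int) (d : Nat) (ferias : List Int) :
    ((((PySem.List.pyRange a b 1).filter (fun m => !(ferias.contains m))).take d))
      = (((PySem.List.pyRange a (min b (a + (d : Int) + (ferias.length : Int))) 1).filter
          (fun m => !(ferias.contains m))).take d) := by
  by_cases hb : b ≤ a + (d : Int) + (ferias.length : Int)
  · have : min b (a + (d : Int) + (ferias.length : Int)) = b := by omega
    rw [this]
  · set hi := min b (a + (d : Int) + (ferias.length : Int)) with hhi
    have h1 : hi = a + (d : Int) + (ferias.length : Int) := by omega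
    have hsplit := PySem.List.pyRange_one_append a hi b (by omega) (by omega)
    rw [hsplit, List.filter_append]
    set R := PySem.List.pyRange a hi 1 with hR
    have hlenR : R.length = d + ferias.length := by
      rw [hR, PySem.List.length_pyRange_one]; omega
    set p : Int → Bool := fun m => !(ferias.contains m) with hp
    have hbadsub : (R.filter (fun m => ferias.contains m)).toFinset ⊆ ferias.toFinset := by
      intro x hx
      simp only [List.mem_toFinset, List.mem_filter] at hx ⊢
      simpa using hx.2
    have hbadnodup : (R.filter (fun m => ferias.contains m)).Nodup :=
      (PySem.List.nodup_pyRange_one a hi).filter _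
    have hbad : (R.filter (fun m => ferias.contains m)).length ≤ ferias.length := by
      calc (R.filter (fun m => ferias.contains m)).length
          = (R.filter (fun m => ferias.contains m)).toFinset.card := by
            rw [List.toFinset_card_of_nodup hbadnodup]
        _ ≤ ferias.toFinset.card := Finset.card_le_card hbadsub
        _ ≤ ferias.length := ferias.toFinset_card_le
    have hsum : (R.filter p).length + (R.filter (fun m => ferias.contains m)).length
        = R.length := by
      have hcompl : (fun m => ferias.contains m) = (fun x => !(p x)) := by
        funext x; simp [hp]
      rw [hcompl]
      exact (List.length_eq_length_filter_add p).symm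
    have hd : d ≤ (R.filter p).length := by omega
    rw [List.take_append_of_le_length hd]

-- ===== VERDICT (by name: the statement is the Claim_ definition above) =====
theorem calcular_meses_ativos_spec : Claim_equal_calcular_meses_ativos := by
  intro mes_inicio duracao meses_ferias num_meses _
  unfold Spec_calcular_meses_ativos calcular_meses_ativos calcular_meses_ativos_alt
  dsimp only
  rw [calcA_loop_eq meses_ferias duracao num_meses (num_meses - mes_inicio).toNat
    mes_inicio 0 [] rfl, calcB_candidatos_eq]
  by_cases hd : duracao > 0
  · rw [if_pos hd, PySem.List.slice_to _ (by omega)]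
    have hsub : duracao - 0 = duracao := by omega
    rw [List.nil_append, hsub, take_filter_window mes_inicio num_meses duracao.toNat meses_ferias]
    have hfim : min num_meses (mes_inicio + max duracao 0 + (meses_ferias.length : Int))
        = min num_meses (mes_inicio + (duracao.toNat : Int) + (meses_ferias.length : Int)) := by
      omega
    rw [hfim]
  · rw [if_neg hd]
    have h0 : (duracao - 0).toNat = 0 := by omega
    simp only [h0, List.take_zero, List.nil_append]
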